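-- pv_equiv track=rewrite | github.com/hotdocx/emdash | scripts/normalize_term_implicits.py | consume_term
-- ===== SOURCE A (Python) =====
-- def find_matching(text: str, open_pos: int, open_ch: str, close_ch: str) -> int | None:
--     if open_pos >= len(text) or text[open_pos] != open_ch:
--         return None
--     depth = 0
--     i = open_pos
--     while i < len(text):
--         ch = text[i]
--         if ch == open_ch:
--             depth += 1
--         elif ch == close_ch:
--             depth -= 1
--             if depth == 0:
--                 return i
--         i += 1
--     return None
--
-- def consume_term(text: str, pos: int) -> tuple[str, int] | None:
--     """
--     Consume one term argument at `pos` (skipping whitespace), returning (term_text, next_pos).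
--     Conservative: supports identifiers and balanced (...) / [...] terms.
--     """
--     i = pos
--     while i < len(text) and text[i].isspace():
--         i += 1
--     if i >= len(text):
--         return None
--
--     ch = text[i]
--     if ch == "(":
--         close = find_matching(text, i, "(", ")")
--         if close is None:
--             return None
--         return (text[i : close + 1], close + 1)
--
--     if ch == "[":
--         close = find_matching(text, i, "[", "]")
--         if close is None:
--             return None
--         return (text[i : close + 1], close + 1)
--
--     # identifier-ish token (approximate; adequate for our local rewrites)
--     j = i
--     while j < len(text) and not text[j].isspace() and text[j] not in {"(", ")", "[", "]", ",", ";"}: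
--         j += 1
--     if j == i:
--         return None
--     return (text[i:j], j)
-- ===== SOURCE B (Python) =====
-- _PAIR = {"(": ")", "[": "]"}
-- _STOP = "()[],;"
--
-- def _match(text, open_pos, open_ch, close_ch):
--     # recursive descent: text[open_pos] is open_ch; find its matching close_ch,
--     # recursing to jump past nested open_ch..close_ch groups; None if unmatched
--     j = open_pos + 1
--     n = len(text)
--     while j < n:
--         ch = text[j]
--         if ch == close_ch:
--             return j
--         if ch == open_ch:
--             k = _match(text, j, open_ch, close_ch)
--             if k is None:
--                 return None
--             j = k + 1
--         else:
--             j += 1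
--     return None
--
-- def consume_term(text, pos):
--     n = len(text)
--     i = pos
--     while i < n and text[i].isspace():
--         i += 1
--     if i >= n:
--         return None
--     ch = text[i]
--     close_ch = _PAIR.get(ch)
--     if close_ch is not None:
--         close = _match(text, i, ch, close_ch)
--         if close is None:
--             return None
--         return (text[i:close + 1], close + 1)
--     j = i
--     while j < n and not text[j].isspace() and text[j] not in _STOP:
--         j += 1
--     return (text[i:j], j) if j > i else None
-- ===== Notes on version B (the rewrite author's own statement) =====
-- stated objective: alternative
-- what changed: Balanced-bracket matching is reimplemented as recursive descent (a helper that recurses to find each nested bracket's matching close and jumps past it) instead of A's single scan with a depth counter, and the open->close dispatch goes through a pair table instead of duplicated if-branches.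
import Mathlib
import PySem

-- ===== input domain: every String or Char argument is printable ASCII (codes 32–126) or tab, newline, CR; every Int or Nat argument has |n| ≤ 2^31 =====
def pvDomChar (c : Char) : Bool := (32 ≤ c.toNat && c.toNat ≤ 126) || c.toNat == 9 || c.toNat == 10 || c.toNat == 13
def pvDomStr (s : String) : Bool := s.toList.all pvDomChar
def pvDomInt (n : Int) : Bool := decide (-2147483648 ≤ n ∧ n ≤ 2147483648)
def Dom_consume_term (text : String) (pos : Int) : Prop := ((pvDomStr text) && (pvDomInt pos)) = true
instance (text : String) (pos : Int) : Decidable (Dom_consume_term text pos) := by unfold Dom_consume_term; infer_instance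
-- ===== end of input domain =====

-- B replaces A's depth-counter bracket matching by recursive descent (a helper that recurses past
-- nested brackets and jumps to just after their close) and dispatches on a {open: close} table;
-- objective: alternative decomposition, same cost. Equivalence is about the return value only.

-- ===== PORT A =====

-- A: `while i < len(text) and text[i].isspace(): i += 1` (an index below -len would raise; the port stops there, excluded by Pre_)
def pvSkipA (lc : List Char) (i : Int) : Int :=
  if _h : i < (lc.length : Int) ∧ (match PySem.List.pyGet? lc i with
      | some ch => PySem.Chars.isspace ch
      | none => false) = true then
    pvSkipA lc (i + 1)
  else i
termination_by ((lc.length : Int) - i).toNat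
decreasing_by omega

-- body of A's find_matching `while` loop, state (i, depth)
def pvLoopA (lc : List Char) (oc cc : Char) (i d : Int) : Option Int :=
  if _h : i < (lc.length : Int) then
    match PySem.List.pyGet? lc i with
    | none => none   -- IndexError; unreachable from consume_term under Pre_
    | some ch =>
      if ch = oc then pvLoopA lc oc cc (i + 1) (d + 1)
      else if ch = cc then
        (if d - 1 = 0 then some i else pvLoopA lc oc cc (i + 1) (d - 1))
      else pvLoopA lc oc cc (i + 1) d
  else none
termination_by ((lc.length : Int) - i).toNat
decreasing_by all_goals omega

def pvFindMatchingA (lc : List Char) (open_pos : Int) (oc cc : Char) : Option Int :=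
  if (lc.length : Int) ≤ open_pos then none
  else match PySem.List.pyGet? lc open_pos with
    | none => none   -- text[open_pos] would raise; unreachable from consume_term under Pre_
    | some ch => if ch ≠ oc then none else pvLoopA lc oc cc open_pos 0

def pvStopSetA : PySem.Set Char := PySem.Set.ofList ['(', ')', '[', ']', ',', ';']

-- A's identifier scan: `while j < len and not text[j].isspace() and text[j] not in {…}`
def pvIdentA (lc : List Char) (j : Int) : Int :=
  if _h : j < (lc.length : Int) ∧ (match PySem.List.pyGet? lc j with
      | some ch => !PySem.Chars.isspace ch && !PySem.Set.contains pvStopSetA ch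
      | none => false) = true then
    pvIdentA lc (j + 1)
  else j
termination_by ((lc.length : Int) - j).toNat
decreasing_by omega

def consume_term (text : String) (pos : Int) : Option (String × Int) :=
  let lc := text.toList
  let i := pvSkipA lc pos
  if (lc.length : Int) ≤ i then none
  else
    match PySem.List.pyGet? lc i with
    | none => none   -- IndexError (pos below -len); excluded by Pre_
    | some ch =>
      if ch = '(' then
        match pvFindMatchingA lc i '(' ')' with
        | none => none
        | some close => some (PySem.Str.slice text (some i) (some (close + 1)), close + 1)
      else if ch = '[' then
        match pvFindMatchingA lc i '[' ']' with
        | none => none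
        | some close => some (PySem.Str.slice text (some i) (some (close + 1)), close + 1)
      else
        let j := pvIdentA lc i
        if j = i then none
        else some (PySem.Str.slice text (some i) (some j), j)

-- ===== PORT B =====

-- B: same whitespace skip loop
def pvSkipB (lc : List Char) (i : Int) : Int :=
  if _h : i < (lc.length : Int) ∧ (match PySem.List.pyGet? lc i with
      | some ch => PySem.Chars.isspace ch
      | none => false) = true then
    pvSkipB lc (i + 1)
  else i
termination_by ((lc.length : Int) - i).toNat
decreasing_by omega

-- B's `_match` loop from position j (one past some open char): recursive descent, a nested
-- open recurses and jumps past its matching close. Fuel only guards totality (each call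
-- strictly advances the position, so the fuel supplied by pvMatchB is always sufficient).
def pvLoopB (lc : List Char) (oc cc : Char) : Nat → Int → Option Int
  | 0, _ => none
  | fuel + 1, j =>
    if (lc.length : Int) ≤ j then none
    else match PySem.List.pyGet? lc j with
      | none => none   -- IndexError; unreachable from consume_term_alt under Pre_
      | some ch =>
        if ch = cc then some j
        else if ch = oc then
          match pvLoopB lc oc cc fuel (j + 1) with   -- k = _match(text, j, …)
          | none => none
          | some k => pvLoopB lc oc cc fuel (k + 1)  -- j = k + 1; continue
        else pvLoopB lc oc cc fuel (j + 1)

def pvMatchB (lc : List Char) (oc cc : Char) (open_pos : Int) : Option Int :=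
  pvLoopB lc oc cc (((lc.length : Int) - open_pos).toNat + 1) (open_pos + 1)

def pvPairB : PySem.Dict Char Char := PySem.Dict.ofList [('(', ')'), ('[', ']')]

def pvStopStrB : List Char := "()[],;".toList

-- B's identifier scan; `ch not in "()[],;"` for a single char is list membership (exact)
def pvIdentB (lc : List Char) (j : Int) : Int :=
  if _h : j < (lc.length : Int) ∧ (match PySem.List.pyGet? lc j with
      | some ch => !PySem.Chars.isspace ch && !pvStopStrB.contains ch
      | none => false) = true then
    pvIdentB lc (j + 1)
  else j
termination_by ((lc.length : Int) - j).toNat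
decreasing_by omega

def consume_term_alt (text : String) (pos : Int) : Option (String × Int) :=
  let lc := text.toList
  let i := pvSkipB lc pos
  if (lc.length : Int) ≤ i then none
  else
    match PySem.List.pyGet? lc i with
    | none => none   -- IndexError (pos below -len); excluded by Pre_
    | some ch =>
      match PySem.Dict.get? pvPairB ch with
      | some cc =>
        match pvMatchB lc ch cc i with
        | none => none
        | some close => some (PySem.Str.slice text (some i) (some (close + 1)), close + 1)
      | none =>
        let j := pvIdentB lc i
        if i < j then some (PySem.Str.slice text (some i) (some j), j)
        else none

-- ===== PRECONDITION & SPEC =====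

-- A raises IndexError exactly when pos < -len(text) (the first text[pos] access); nothing else raises.
def Pre_consume_term (text : String) (pos : Int) : Prop := -(text.toList.length : Int) ≤ pos
instance (text : String) (pos : Int) : Decidable (Pre_consume_term text pos) := by
  unfold Pre_consume_term; infer_instance

def pvWitness_consume_term : String × Int := (" (f x) y", 0)

def Spec_consume_term (text : String) (pos : Int) (out : Option (String × Int)) : Prop := out = consume_term_alt text pos
instance (text : String) (pos : Int) (out : Option (String × Int)) : Decidable (Spec_consume_term text pos out) := by unfold Spec_consume_term; infer_instance

-- ===== CLAIM (what is proved, stated in full; the proofs are below) =====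
def Claim_equal_consume_term : Prop := ∀ (text : String) (pos : Int), Dom_consume_term text pos → Pre_consume_term text pos → Spec_consume_term text pos (consume_term text pos)

-- ===== LEMMAS AND PROOFS =====

-- instance-specific unfolding lemmas for the loop definitions

theorem pvLoopA_of_end (lc : List Char) (oc cc : Char) (j d : Int)
    (h : ¬ j < (lc.length : Int)) : pvLoopA lc oc cc j d = none := by
  rw [pvLoopA, dif_neg h]

theorem pvLoopA_of_none (lc : List Char) (oc cc : Char) (j d : Int)
    (hj : j < (lc.length : Int)) (hg : PySem.List.pyGet? lc j = none) :
    pvLoopA lc oc cc j d = none := by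
  rw [pvLoopA, dif_pos hj, hg]

theorem pvLoopA_of_some (lc : List Char) (oc cc : Char) (j d : Int) (ch : Char)
    (hj : j < (lc.length : Int)) (hg : PySem.List.pyGet? lc j = some ch) :
    pvLoopA lc oc cc j d =
      if ch = oc then pvLoopA lc oc cc (j + 1) (d + 1)
      else if ch = cc then (if d - 1 = 0 then some j else pvLoopA lc oc cc (j + 1) (d - 1))
      else pvLoopA lc oc cc (j + 1) d := by
  rw [pvLoopA, dif_pos hj, hg]

theorem pvLoopB_succ_of_end (lc : List Char) (oc cc : Char) (fuel : Nat) (j : Int)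
    (h : (lc.length : Int) ≤ j) : pvLoopB lc oc cc (fuel + 1) j = none := by
  rw [pvLoopB, if_pos h]

theorem pvLoopB_succ_of_none (lc : List Char) (oc cc : Char) (fuel : Nat) (j : Int)
    (hj : ¬ (lc.length : Int) ≤ j) (hg : PySem.List.pyGet? lc j = none) :
    pvLoopB lc oc cc (fuel + 1) j = none := by
  rw [pvLoopB, if_neg hj, hg]

theorem pvLoopB_succ_of_some (lc : List Char) (oc cc : Char) (fuel : Nat) (j : Int) (ch : Char)
    (hj : ¬ (lc.length : Int) ≤ j) (hg : PySem.List.pyGet? lc j = some ch) :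
    pvLoopB lc oc cc (fuel + 1) j =
      if ch = cc then some j
      else if ch = oc then
        (pvLoopB lc oc cc fuel (j + 1)).bind (fun k => pvLoopB lc oc cc fuel (k + 1))
      else pvLoopB lc oc cc fuel (j + 1) := by
  rw [pvLoopB, if_neg hj, hg]
  dsimp only
  split_ifs
  all_goals first
    | rfl
    | (cases pvLoopB lc oc cc fuel (j + 1) <;> rfl)

theorem pvSkip_eq (lc : List Char) (i : Int) : pvSkipB lc i = pvSkipA lc i := by
  rw [pvSkipB, pvSkipA]
  split_ifs with h
  · exact pvSkip_eq lc (i + 1)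
  · rfl
termination_by ((lc.length : Int) - i).toNat
decreasing_by omega

theorem pvIdent_eq (lc : List Char) (j : Int) : pvIdentB lc j = pvIdentA lc j := by
  rw [pvIdentB, pvIdentA]
  have hc : ∀ ch : Char, pvStopStrB.contains ch = PySem.Set.contains pvStopSetA ch := by
    intro ch
    simp [pvStopStrB, pvStopSetA, PySem.Set.contains_eq_listContains]
  simp only [hc]
  split_ifs with h
  · exact pvIdent_eq lc (j + 1)
  · rfl
termination_by ((lc.length : Int) - j).toNat
decreasing_by omega

theorem pvIdentA_ge (lc : List Char) (j : Int) : j ≤ pvIdentA lc j := by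
  rw [pvIdentA]
  split_ifs with h
  · have := pvIdentA_ge lc (j + 1); omega
  · exact le_refl j
termination_by ((lc.length : Int) - j).toNat
decreasing_by omega

-- bounds of A's depth loop: a returned index lies between the start and the end of the text
theorem pvLoopA_bounds (lc : List Char) (oc cc : Char) :
    ∀ (N : Nat) (j d k : Int), (((lc.length : Int) - j).toNat ≤ N) →
      pvLoopA lc oc cc j d = some k → j ≤ k ∧ k < (lc.length : Int) := by
  intro N
  induction N with
  | zero =>
    intro j d k hN h
    rw [pvLoopA_of_end lc oc cc j d (by omega)] at h
    exact absurd h (by simp)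
  | succ N ih =>
    intro j d k hN h
    by_cases hj : j < (lc.length : Int)
    · cases hg : PySem.List.pyGet? lc j with
      | none =>
        rw [pvLoopA_of_none lc oc cc j d hj hg] at h
        exact absurd h (by simp)
      | some ch =>
        rw [pvLoopA_of_some lc oc cc j d ch hj hg] at h
        split_ifs at h with h1 h2 h3
        · have := ih (j + 1) (d + 1) k (by omega) h; omega
        · rw [Option.some_inj] at h; omega
        · have := ih (j + 1) (d - 1) k (by omega) h; omega
        · have := ih (j + 1) d k (by omega) h; omega
    · rw [pvLoopA_of_end lc oc cc j d hj] at h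
      exact absurd h (by simp)

-- A's depth loop at depth d+2 factors: find the close for one level, then resume one level up
theorem pvLoopA_factor (lc : List Char) (oc cc : Char) :
    ∀ (N : Nat) (j d : Int), (((lc.length : Int) - j).toNat ≤ N) → 0 ≤ d →
      pvLoopA lc oc cc j (d + 2) =
        (pvLoopA lc oc cc j 1).bind (fun k => pvLoopA lc oc cc (k + 1) (d + 1)) := by
  intro N
  induction N with
  | zero =>
    intro j d hN hd
    rw [pvLoopA_of_end lc oc cc j (d + 2) (by omega),
        pvLoopA_of_end lc oc cc j 1 (by omega)]
    rfl
  | succ N ih =>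
    intro j d hN hd
    by_cases hj : j < (lc.length : Int)
    · cases hg : PySem.List.pyGet? lc j with
      | none =>
        rw [pvLoopA_of_none lc oc cc j (d + 2) hj hg,
            pvLoopA_of_none lc oc cc j 1 hj hg]
        rfl
      | some ch =>
        rw [pvLoopA_of_some lc oc cc j (d + 2) ch hj hg,
            pvLoopA_of_some lc oc cc j 1 ch hj hg]
        by_cases h1 : ch = oc
        · rw [if_pos h1, if_pos h1]
          have hL : pvLoopA lc oc cc (j + 1) (d + 1 + 2) =
              (pvLoopA lc oc cc (j + 1) 1).bind
                (fun k => pvLoopA lc oc cc (k + 1) (d + 1 + 1)) :=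
            ih (j + 1) (d + 1) (by omega) (by omega)
          have hR : pvLoopA lc oc cc (j + 1) (0 + 2) =
              (pvLoopA lc oc cc (j + 1) 1).bind
                (fun k => pvLoopA lc oc cc (k + 1) (0 + 1)) :=
            ih (j + 1) 0 (by omega) (by omega)
          rw [show d + 2 + 1 = d + 1 + 2 by ring, hL,
              show (1 : Int) + 1 = 0 + 2 by ring, hR, Option.bind_assoc]
          apply Option.bind_congr
          intro k hk
          have hb := pvLoopA_bounds lc oc cc N (j + 1) 1 k (by omega) hk
          have hmid : pvLoopA lc oc cc (k + 1) (d + 2) =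
              (pvLoopA lc oc cc (k + 1) 1).bind
                (fun k' => pvLoopA lc oc cc (k' + 1) (d + 1)) :=
            ih (k + 1) d (by omega) hd
          simp only [show (0 : Int) + 1 = 1 by ring,
            show d + 1 + 1 = d + 2 by ring]
          rw [← hmid]
        · rw [if_neg h1, if_neg h1]
          by_cases h2 : ch = cc
          · rw [if_pos h2, if_pos h2,
                if_neg (by omega : ¬ d + 2 - 1 = 0), if_pos (by norm_num)]
            simp only [Option.bind_some]
            congr 1
            ring
          · rw [if_neg h2, if_neg h2]
            exact ih (j + 1) d (by omega) hd
    · rw [pvLoopA_of_end lc oc cc j (d + 2) hj, pvLoopA_of_end lc oc cc j 1 hj]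
      rfl

-- B's recursive descent computes exactly A's depth loop at depth 1, given enough fuel
theorem pvLoopB_eq (lc : List Char) (oc cc : Char) (hocc : oc ≠ cc) :
    ∀ (fuel : Nat) (j : Int), (((lc.length : Int) - j).toNat < fuel) →
      pvLoopB lc oc cc fuel j = pvLoopA lc oc cc j 1 := by
  intro fuel
  induction fuel with
  | zero => intro j h; omega
  | succ fuel ih =>
    intro j hfuel
    by_cases hj : j < (lc.length : Int)
    · cases hg : PySem.List.pyGet? lc j with
      | none =>
        rw [pvLoopB_succ_of_none lc oc cc fuel j (by omega) hg,
            pvLoopA_of_none lc oc cc j 1 hj hg]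
      | some ch =>
        rw [pvLoopB_succ_of_some lc oc cc fuel j ch (by omega) hg,
            pvLoopA_of_some lc oc cc j 1 ch hj hg]
        by_cases hcc : ch = cc
        · have hno : ¬ ch = oc := by rw [hcc]; exact fun h => hocc h.symm
          rw [if_pos hcc, if_neg hno, if_pos hcc, if_pos (by norm_num)]
        · rw [if_neg hcc]
          by_cases hoc : ch = oc
          · rw [if_pos hoc, if_pos hoc]
            rw [ih (j + 1) (by omega)]
            have hfac : pvLoopA lc oc cc (j + 1) (0 + 2) =
                (pvLoopA lc oc cc (j + 1) 1).bind
                  (fun k => pvLoopA lc oc cc (k + 1) (0 + 1)) :=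
              pvLoopA_factor lc oc cc (((lc.length : Int) - (j + 1)).toNat) (j + 1) 0
                (le_refl _) (by norm_num)
            rw [show (1 : Int) + 1 = 0 + 2 by ring, hfac]
            apply Option.bind_congr
            intro k hk
            have hb := pvLoopA_bounds lc oc cc (((lc.length : Int) - (j + 1)).toNat)
              (j + 1) 1 k (le_refl _) hk
            rw [show (0 : Int) + 1 = 1 by ring]
            exact ih (k + 1) (by omega)
          · rw [if_neg hoc, if_neg hoc, if_neg hcc]
            exact ih (j + 1) (by omega)
    · rw [pvLoopB_succ_of_end lc oc cc fuel j (by omega),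
          pvLoopA_of_end lc oc cc j 1 hj]

-- at a dispatch position holding the open char, A's find_matching = B's recursive _match
theorem pvBracket_eq (lc : List Char) (oc cc : Char) (i : Int)
    (hocc : oc ≠ cc) (hi : i < (lc.length : Int))
    (hg : PySem.List.pyGet? lc i = some oc) :
    pvFindMatchingA lc i oc cc = pvMatchB lc oc cc i := by
  rw [pvFindMatchingA, pvMatchB, if_neg (by omega), hg]
  dsimp only
  rw [if_neg (show ¬ oc ≠ oc from fun h => h rfl)]
  rw [pvLoopA_of_some lc oc cc i 0 oc hi hg, if_pos rfl,
    show (0 : Int) + 1 = 1 by ring]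
  exact (pvLoopB_eq lc oc cc hocc (((lc.length : Int) - i).toNat + 1) (i + 1)
    (by omega)).symm ▸ rfl

theorem pvPairB_none (ch : Char) (h1 : ch ≠ '(') (h2 : ch ≠ '[') :
    PySem.Dict.get? pvPairB ch = none := by
  simp only [pvPairB, PySem.Dict.ofList, PySem.Dict.update, PySem.Dict.insert, PySem.Dict.get?,
    PySem.Dict.empty, PySem.Dict.contains, List.foldl]
  simp [h1.symm, h2.symm]

theorem consume_term_eq (text : String) (pos : Int) :
    consume_term text pos = consume_term_alt text pos := by
  rw [consume_term, consume_term_alt]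
  simp only
  rw [pvSkip_eq]
  set lc := text.toList with hlc
  set i := pvSkipA lc pos with hi
  by_cases hlen : (lc.length : Int) ≤ i
  · rw [if_pos hlen, if_pos hlen]
  · rw [if_neg hlen, if_neg hlen]
    cases hg : PySem.List.pyGet? lc i with
    | none => rfl
    | some ch =>
      simp only
      by_cases h1 : ch = '('
      · subst h1
        rw [if_pos rfl, show PySem.Dict.get? pvPairB '(' = some ')' by rfl]
        rw [pvBracket_eq lc '(' ')' i (by decide) (by omega) hg]
      · by_cases h2 : ch = '['
        · subst h2
          rw [if_neg h1, if_pos rfl, show PySem.Dict.get? pvPairB '[' = some ']' by rfl]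
          rw [pvBracket_eq lc '[' ']' i (by decide) (by omega) hg]
        · rw [if_neg h1, if_neg h2, pvPairB_none ch h1 h2]
          simp only
          rw [pvIdent_eq]
          have hge := pvIdentA_ge lc i
          by_cases he : pvIdentA lc i = i
          · rw [if_pos he, if_neg (by omega)]
          · rw [if_neg he, if_pos (by omega)]

-- ===== VERDICT (by name: the statement is the Claim_ definition above) =====
theorem consume_term_spec : Claim_equal_consume_term := by
  intro text pos _ _
  unfold Spec_consume_term
  exact consume_term_eq text pos
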